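-- pv_equiv track=rewrite | github.com/Peterg101/shopify-redux | generation_service/cad/converter.py | _needs_clean_before
-- ===== SOURCE A (Python) =====
-- COSMETIC_OPS = {
--     "fillet", "chamfer",
-- }
--
-- def _needs_clean_before(steps: list[dict], index: int) -> bool:
--     """Determine if a .clean() call is needed before step at `index`.
--
--     Insert .clean() when transitioning from boolean ops to cosmetic ops,
--     or after any union operation.
--     """
--     if index == 0:
--         return False
--
--     current_op = steps[index].get("op", "")
--     prev_op = steps[index - 1].get("op", "")
--
--     # Clean before fillets/chamfers if the previous op was a boolean
--     if current_op in COSMETIC_OPS: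
--         # Check if any preceding op was a boolean
--         for j in range(index - 1, -1, -1):
--             op_j = steps[j].get("op", "")
--             if op_j in ("union", "cut_blind", "cut_through", "holes", "shell", "mirror"):
--                 return True
--             if op_j in COSMETIC_OPS:
--                 return False  # already cleaned
--         return False
--
--     return False
-- ===== SOURCE B (Python) =====
-- COSMETIC_OPS = {
--     "fillet", "chamfer",
-- }
--
-- BOOLEAN_OPS = {"union", "cut_blind", "cut_through", "holes", "shell", "mirror"}
--
-- def _needs_clean_before(steps: list[dict], index: int) -> bool:
--     """Forward accumulate-then-decide: track whether the most recent
--     boolean/cosmetic op before `index` was a boolean."""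
--     if index == 0:
--         return False
--     if steps[index].get("op", "") not in COSMETIC_OPS:
--         return False
--     last_was_boolean = False
--     for j in range(index):
--         op = steps[j].get("op", "")
--         if op in BOOLEAN_OPS:
--             last_was_boolean = True
--         elif op in COSMETIC_OPS:
--             last_was_boolean = False
--     return last_was_boolean
-- ===== Notes on version B (the rewrite author's own statement) =====
-- stated objective: alternative
-- what changed: Replaces A's backward scan with early return at the first boolean/cosmetic hit by a forward fold over the prefix that keeps overwriting a single last-was-boolean flag and decides only after the loop.
import Mathlib
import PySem

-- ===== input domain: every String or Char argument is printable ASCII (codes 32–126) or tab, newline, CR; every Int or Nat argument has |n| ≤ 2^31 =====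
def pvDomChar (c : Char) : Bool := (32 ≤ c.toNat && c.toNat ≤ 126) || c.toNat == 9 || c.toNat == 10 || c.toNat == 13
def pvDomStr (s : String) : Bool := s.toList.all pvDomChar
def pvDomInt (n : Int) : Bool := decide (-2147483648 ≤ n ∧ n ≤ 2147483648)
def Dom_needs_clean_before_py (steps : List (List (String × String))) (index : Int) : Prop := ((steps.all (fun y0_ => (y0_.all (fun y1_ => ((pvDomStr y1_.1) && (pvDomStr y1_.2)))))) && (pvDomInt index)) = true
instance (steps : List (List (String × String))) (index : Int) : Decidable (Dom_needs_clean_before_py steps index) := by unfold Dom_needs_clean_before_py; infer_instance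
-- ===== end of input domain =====

-- B replaces A's backward early-exit scan by a forward fold that overwrites a
-- last-was-boolean flag and decides after the loop (alternative decomposition, same cost).


-- ===== PORT A =====
-- module constant COSMETIC_OPS (shared by both Pythons)
def cosmeticOps : List String := ["fillet", "chamfer"]
-- A's inline tuple of boolean ops
def boolOpsA : List String := ["union", "cut_blind", "cut_through", "holes", "shell", "mirror"]

-- steps[j].get("op", "") for a dict given as an association list
def getOp (steps : List (List (String × String))) (j : Int) : String :=
  PySem.Dict.getD (PySem.Dict.mk (PySem.List.pyGetD steps j [])) "op" ""

-- A's 'for j in range(index-1, -1, -1)' loop with its two early returns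
def loopA (steps : List (List (String × String))) : List Int → Bool
  | [] => false
  | j :: rest =>
    let op_j := getOp steps j
    if op_j ∈ boolOpsA then true
    else if op_j ∈ cosmeticOps then false
    else loopA steps rest

def needs_clean_before_py (steps : List (List (String × String))) (index : Int) : Bool :=
  if index = 0 then false
  else
    let current_op := getOp steps index
    let _prev_op := getOp steps (index - 1)   -- computed by A (can raise in Python), unused
    if current_op ∈ cosmeticOps then
      loopA steps (PySem.List.pyRange (index - 1) (-1) (-1))
    else false

-- ===== PORT B =====
def boolOpsB : List String := ["union", "cut_blind", "cut_through", "holes", "shell", "mirror"]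

def needs_clean_before_py_alt (steps : List (List (String × String))) (index : Int) : Bool :=
  if index = 0 then false
  else if ¬ (getOp steps index ∈ cosmeticOps) then false
  else
    (PySem.List.pyRange 0 index 1).foldl
      (fun last_was_boolean j =>
        let op := getOp steps j
        if op ∈ boolOpsB then true
        else if op ∈ cosmeticOps then false
        else last_was_boolean)
      false

-- ===== PRECONDITION & SPEC =====
-- Pre_ excludes exactly the inputs where Python A raises IndexError: when index ≠ 0 it
-- subscripts both steps[index] and steps[index-1], so both must be valid Python indices.
def Pre_needs_clean_before_py (steps : List (List (String × String))) (index : Int) : Prop :=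
  index = 0 ∨ (PySem.Raise.InRange steps.length index ∧ PySem.Raise.InRange steps.length (index - 1))
instance (steps : List (List (String × String))) (index : Int) : Decidable (Pre_needs_clean_before_py steps index) := by unfold Pre_needs_clean_before_py; infer_instance

def pvWitness_needs_clean_before_py : (List (List (String × String))) × Int :=
  ([[("op", "union")], [("op", "fillet")]], 1)

def Spec_needs_clean_before_py (steps : List (List (String × String))) (index : Int) (out : Bool) : Prop := out = needs_clean_before_py_alt steps index
instance (steps : List (List (String × String))) (index : Int) (out : Bool) : Decidable (Spec_needs_clean_before_py steps index out) := by unfold Spec_needs_clean_before_py; infer_instance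

-- ===== CLAIM (what is proved, stated in full; the proofs are below) =====
def Claim_equal_needs_clean_before_py : Prop := ∀ (steps : List (List (String × String))) (index : Int), Dom_needs_clean_before_py steps index → Pre_needs_clean_before_py steps index → Spec_needs_clean_before_py steps index (needs_clean_before_py steps index)


-- ===== LEMMAS AND PROOFS =====

-- classification of an op: some true = boolean, some false = cosmetic, none = irrelevant
def opClass (steps : List (List (String × String))) (j : Int) : Option Bool :=
  let op := getOp steps j
  if op ∈ boolOpsA then some true
  else if op ∈ cosmeticOps then some false
  else none

theorem loopA_eq_findSome? (steps : List (List (String × String))) (l : List Int) :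
    loopA steps l = (l.findSome? (opClass steps)).getD false := by
  induction l with
  | nil => rfl
  | cons j rest ih =>
    simp only [loopA, List.findSome?_cons, opClass]
    split_ifs <;> simp [*]

theorem foldlB_eq_findSome? (steps : List (List (String × String))) (l : List Int) (flag : Bool) :
    l.foldl
      (fun last_was_boolean j =>
        let op := getOp steps j
        if op ∈ boolOpsB then true
        else if op ∈ cosmeticOps then false
        else last_was_boolean)
      flag = (l.reverse.findSome? (opClass steps)).getD flag := by
  induction l generalizing flag with
  | nil => rfl
  | cons j rest ih =>
    simp only [List.foldl_cons, List.reverse_cons, List.findSome?_append, ih]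
    cases h : rest.reverse.findSome? (opClass steps) with
    | some b => simp
    | none =>
      simp only [Option.none_or, List.findSome?_cons, List.findSome?_nil, opClass,
        boolOpsB, boolOpsA]
      split_ifs with h1 h2 <;> simp

-- ===== VERDICT (by name: the statement is the Claim_ definition above) =====
theorem needs_clean_before_py_spec : Claim_equal_needs_clean_before_py := by
  intro steps index _hdom _hpre
  unfold Spec_needs_clean_before_py needs_clean_before_py needs_clean_before_py_alt
  by_cases h0 : index = 0
  · simp [h0]
  · simp only [h0, if_false]
    by_cases hc : getOp steps index ∈ cosmeticOps
    · simp only [hc, not_true, if_true, if_false]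
      rw [loopA_eq_findSome?, foldlB_eq_findSome?]
      have : PySem.List.pyRange (index - 1) (-1) (-1)
          = (PySem.List.pyRange 0 index 1).reverse := by
        simpa using PySem.List.pyRange_neg_one_eq_reverse (index - 1) (-1)
      rw [this]
    · simp [hc]
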